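-- pv_equiv track=rewrite | github.com/Charles-AcornBids/MergeTune | test_optimize.py | slow_list_search
-- ===== SOURCE A (Python) =====
-- def slow_list_search(n: int = 1000):
--     """SLOW: Searching in list repeatedly (O(n) each time)."""
--     data = list(range(n))
--     found = []
--     search_terms = list(range(0, n, 10))
--     for term in search_terms:
--         if term in data:  # O(n) operation
--             found.append(term)
--     return found
-- ===== SOURCE B (Python) =====
-- def slow_list_search(n: int = 1000):
--     # Every multiple of 10 in [0, n) lies in range(n), so the membership
--     # filter never removes anything: the result is just range(0, n, 10).
--     return list(range(0, n, 10))
-- ===== Notes on version B (the rewrite author's own statement) =====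
-- stated objective: faster
-- what changed: Replaced the build-list-then-membership-filter loop with the closed form list(range(0, n, 10)), valid because every search term already lies in data.
import Mathlib
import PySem

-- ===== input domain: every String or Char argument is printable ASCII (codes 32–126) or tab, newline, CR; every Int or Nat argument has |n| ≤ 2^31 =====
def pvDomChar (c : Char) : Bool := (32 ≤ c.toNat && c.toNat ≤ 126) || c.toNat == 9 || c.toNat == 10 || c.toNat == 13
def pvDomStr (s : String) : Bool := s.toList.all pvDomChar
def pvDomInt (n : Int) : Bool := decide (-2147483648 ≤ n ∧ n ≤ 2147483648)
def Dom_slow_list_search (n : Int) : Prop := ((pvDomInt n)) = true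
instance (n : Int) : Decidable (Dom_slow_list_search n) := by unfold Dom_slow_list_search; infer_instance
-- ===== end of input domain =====

-- ===== PORT A =====
-- Header: B returns range(0, n, 10) directly (closed form); A's membership filter never removes anything.
def slow_list_search (n : Int) : List Int :=
  let data := PySem.List.pyRange 0 n 1
  let found : List Int := []
  let search_terms := PySem.List.pyRange 0 n 10
  search_terms.foldl (fun found term => if data.contains term then found ++ [term] else found) found

-- ===== PORT B =====
def slow_list_search_alt (n : Int) : List Int := PySem.List.pyRange 0 n 10

-- ===== PRECONDITION & SPEC =====
def Spec_slow_list_search (n : Int) (out : List Int) : Prop := out = slow_list_search_alt n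
instance (n : Int) (out : List Int) : Decidable (Spec_slow_list_search n out) := by unfold Spec_slow_list_search; infer_instance

-- ===== CLAIM (what is proved, stated in full; the proofs are below) =====
def Claim_equal_slow_list_search : Prop := ∀ (n : Int), Dom_slow_list_search n → Spec_slow_list_search n (slow_list_search n)

-- ===== LEMMAS AND PROOFS =====

-- ===== VERDICT (by name: the statement is the Claim_ definition above) =====
theorem pv_foldl_filter_all {p : Int → Bool} :
    ∀ (L acc : List Int), (∀ t ∈ L, p t = true) →
      L.foldl (fun acc t => if p t then acc ++ [t] else acc) acc = acc ++ L
  | [], acc, _ => by simp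
  | t :: L, acc, h => by
    have ht : p t = true := h t (List.mem_cons_self)
    simp only [List.foldl_cons, ht, if_pos]
    rw [pv_foldl_filter_all L (acc ++ [t]) (fun x hx => h x (List.mem_cons_of_mem _ hx))]
    simp

theorem pv_mem_data (n t : Int) (ht : t ∈ PySem.List.pyRange 0 n 10) :
    (PySem.List.pyRange 0 n 1).contains t = true := by
  rcases ((PySem.List.mem_pyRange_iff_of_pos (a := 0) (b := n) (s := 10) (by norm_num) t).1 ht) with ⟨h1, h2, _⟩
  simp only [List.contains_eq_mem, decide_eq_true_eq]
  exact (PySem.List.mem_pyRange_one).2 ⟨h1, h2⟩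

theorem slow_list_search_spec : Claim_equal_slow_list_search := by
  intro n _
  unfold Spec_slow_list_search slow_list_search slow_list_search_alt
  simp only []
  rw [pv_foldl_filter_all _ [] (fun t ht => pv_mem_data n t ht)]
  simp
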